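-- pv_equiv track=rewrite | github.com/character-navigator/ml-service | util/ebook_parser.py | get_part_words
-- ===== SOURCE A (Python) =====
-- def get_part_words(stcp):
--   if type(stcp) == list:
--     return [get_part_words(stcp_p) for stcp_p in stcp]
--   st, cpath, tag_p = stcp
--   text_clean = st.lstrip().rstrip()
--   current_pos = 0
--   proc_text_parts = []
--
--
--
--   text_parts = text_clean.split(' ')
--   for tp in text_parts:
--     #if len(tp) > 0:
--       proc_text_parts.append({'w':tp, 'cfi':cpath+':'+str(current_pos), 'cfi_end':cpath+':'+str(current_pos+len(tp)), 'tp':tag_p})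
--       current_pos += (len(tp)+1)
--   return proc_text_parts
-- ===== SOURCE B (Python) =====
-- def get_part_words(stcp):
--   if type(stcp) == list:
--     return [get_part_words(p) for p in stcp]
--   st, cpath, tag_p = stcp
--   text = st.strip()
--   starts = [0] + [i + 1 for i, c in enumerate(text) if c == ' ']
--   return [{'w': w,
--            'cfi': cpath + ':' + str(s),
--            'cfi_end': cpath + ':' + str(s + len(w)),
--            'tp': tag_p}
--           for w, s in zip(text.split(' '), starts)]
-- ===== Notes on version B (the rewrite author's own statement) =====
-- stated objective: alternative
-- what changed: Replaces the running current_pos accumulator loop with a direct computation: word start offsets are read off as the character positions right after each space in the stripped text, then zipped with the split words in a single map.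
import Mathlib
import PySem

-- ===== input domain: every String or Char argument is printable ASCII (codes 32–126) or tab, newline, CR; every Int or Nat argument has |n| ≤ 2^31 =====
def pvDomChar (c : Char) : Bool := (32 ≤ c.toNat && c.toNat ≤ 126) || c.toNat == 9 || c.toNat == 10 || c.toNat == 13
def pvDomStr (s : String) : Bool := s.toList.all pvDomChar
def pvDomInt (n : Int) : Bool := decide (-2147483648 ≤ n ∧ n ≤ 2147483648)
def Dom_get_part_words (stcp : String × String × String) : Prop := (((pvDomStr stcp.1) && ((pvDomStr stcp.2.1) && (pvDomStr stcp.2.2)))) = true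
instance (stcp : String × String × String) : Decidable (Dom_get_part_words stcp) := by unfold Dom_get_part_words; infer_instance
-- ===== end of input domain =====

-- B computes word start offsets directly as the character positions after each space of the
-- stripped text instead of threading A's running current_pos accumulator; return values agree
-- everywhere. (The Python list-recursion branch is outside the tuple signature ported here.)

-- ===== PORT A =====
-- one word's dict: {'w':tp,'cfi':cpath+':'+str(pos),'cfi_end':cpath+':'+str(pos+len(tp)),'tp':tag_p}
def gpwDictA (cpath tag_p : String) (tp : List Char) (pos : Int) : List (String × String) :=
  [("w", String.ofList tp),
   ("cfi", cpath ++ ":" ++ PySem.Int.toStr pos),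
   ("cfi_end", cpath ++ ":" ++ PySem.Int.toStr (pos + tp.length)),
   ("tp", tag_p)]

-- the for-loop over text_parts with the mutable current_pos accumulator
def gpwLoopA (cpath tag_p : String) : List (List Char) → Int → List (List (String × String))
  | [], _ => []
  | tp :: rest, pos => gpwDictA cpath tag_p tp pos :: gpwLoopA cpath tag_p rest (pos + tp.length + 1)

def get_part_words (stcp : String × String × String) : List (List (String × String)) :=
  let st := stcp.1
  let cpath := stcp.2.1
  let tag_p := stcp.2.2
  let text_clean := PySem.Chars.rstrip (PySem.Chars.lstrip st.toList)  -- st.lstrip().rstrip()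
  gpwLoopA cpath tag_p (PySem.Chars.splitOn text_clean [' ']) 0

-- ===== PORT B =====
def gpwDictB (cpath tag_p : String) (w : List Char) (s : Int) : List (String × String) :=
  [("w", String.ofList w),
   ("cfi", cpath ++ ":" ++ PySem.Int.toStr s),
   ("cfi_end", cpath ++ ":" ++ PySem.Int.toStr (s + w.length)),
   ("tp", tag_p)]

def get_part_words_alt (stcp : String × String × String) : List (List (String × String)) :=
  let st := stcp.1
  let cpath := stcp.2.1
  let tag_p := stcp.2.2
  let text := PySem.Chars.strip st.toList                               -- st.strip()
  -- starts = [0] + [i+1 for i, c in enumerate(text) if c == ' ']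
  let starts : List Int :=
    0 :: ((PySem.List.enumerate text).filter (fun p => p.2 == ' ')).map (fun p => p.1 + 1)
  ((PySem.Chars.splitOn text [' ']).zip starts).map (fun p => gpwDictB cpath tag_p p.1 p.2)

-- ===== PRECONDITION & SPEC =====
def Spec_get_part_words (stcp : String × String × String) (out : List (List (String × String))) : Prop := out = get_part_words_alt stcp
instance (stcp : String × String × String) (out : List (List (String × String))) : Decidable (Spec_get_part_words stcp out) := by unfold Spec_get_part_words; infer_instance

-- ===== CLAIM (what is proved, stated in full; the proofs are below) =====
def Claim_equal_get_part_words : Prop := ∀ (stcp : String × String × String), Dom_get_part_words stcp → Spec_get_part_words stcp (get_part_words stcp)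

-- ===== LEMMAS AND PROOFS =====

-- clean recursive specification of splitting on a single separator char
def gpwSplit (s : Char) : List Char → List (List Char)
  | [] => [[]]
  | c :: l => if c = s then [] :: gpwSplit s l else (gpwSplit s l).modifyHead (c :: ·)

theorem gpwSplit_ne_nil (s : Char) (l : List Char) : gpwSplit s l ≠ [] := by
  induction l with
  | nil => simp [gpwSplit]
  | cons c l ih =>
    simp only [gpwSplit]
    split
    · simp
    · cases hsp : gpwSplit s l with
      | nil => exact absurd hsp ih
      | cons a t => simp

theorem gpw_go_eq (s : Char) (fuel : Nat) :
    ∀ (l cur : List Char) (acc : List (List Char)), l.length < fuel →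
    PySem.Chars.splitOn.go [s] fuel l cur acc =
      acc.reverse ++ (gpwSplit s l).modifyHead (cur.reverse ++ ·) := by
  induction fuel with
  | zero => intro l cur acc h; omega
  | succ f ih =>
    intro l cur acc h
    cases l with
    | nil => simp [PySem.Chars.splitOn.go, gpwSplit]
    | cons c rest =>
      by_cases hc : c = s
      · subst hc
        have hpre : List.isPrefixOf [c] (c :: rest) = true := by simp [List.isPrefixOf]
        rw [PySem.Chars.splitOn.go, if_pos hpre]
        simp only [List.length_cons, List.length_nil, List.drop_succ_cons, List.drop_zero]
        rw [ih rest [] (cur.reverse :: acc) (by simp at h; omega)]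
        have hne := gpwSplit_ne_nil c rest
        cases hsp : gpwSplit c rest with
        | nil => exact absurd hsp hne
        | cons a t => simp [gpwSplit, hsp]
      · have hpre : List.isPrefixOf [s] (c :: rest) = false := by
          simp [List.isPrefixOf]; exact fun h' => hc h'.symm
        rw [PySem.Chars.splitOn.go, if_neg (by simp [hpre])]
        rw [ih rest (c :: cur) acc (by simp at h ⊢; omega)]
        have hne := gpwSplit_ne_nil s rest
        cases hsp : gpwSplit s rest with
        | nil => exact absurd hsp hne
        | cons a t => simp [gpwSplit, hsp, hc]

theorem gpw_splitOn_eq (s : Char) (l : List Char) :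
    PySem.Chars.splitOn l [s] = gpwSplit s l := by
  rw [PySem.Chars.splitOn, gpw_go_eq s (l.length + 1) l [] [] (by omega)]
  have hne := gpwSplit_ne_nil s l
  cases hsp : gpwSplit s l with
  | nil => exact absurd hsp hne
  | cons a t => simp

-- start offsets as A's loop threads them: pos, pos+|w0|+1, ...
def gpwStarts (pos : Int) : List (List Char) → List Int
  | [] => []
  | w :: rest => pos :: gpwStarts (pos + w.length + 1) rest

theorem gpwStarts_shift (k : Int) : ∀ (ws : List (List Char)) (pos : Int),
    gpwStarts (pos + k) ws = (gpwStarts pos ws).map (· + k) := by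
  intro ws
  induction ws with
  | nil => intro pos; simp [gpwStarts]
  | cons w rest ih =>
    intro pos
    simp only [gpwStarts, List.map_cons, List.cons.injEq, true_and]
    have := ih (pos + w.length + 1)
    rw [← this]; ring_nf

theorem gpwLoopA_eq_zip (cpath tag_p : String) :
    ∀ (ws : List (List Char)) (pos : Int),
    gpwLoopA cpath tag_p ws pos =
      (ws.zip (gpwStarts pos ws)).map (fun p => gpwDictB cpath tag_p p.1 p.2) := by
  intro ws
  induction ws with
  | nil => intro pos; simp [gpwLoopA, gpwStarts]
  | cons w rest ih =>
    intro pos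
    simp [gpwLoopA, gpwStarts, ih, gpwDictA, gpwDictB]

-- B's space-position offsets equal A's threaded offsets
theorem gpwEnumShift (l : List Char) : ∀ (s : Int),
    PySem.List.enumerate l (s + 1) = (PySem.List.enumerate l s).map (fun p => (p.1 + 1, p.2)) := by
  induction l with
  | nil => intro s; simp [PySem.List.enumerate_nil]
  | cons c l ih =>
    intro s
    rw [PySem.List.enumerate_cons, PySem.List.enumerate_cons, List.map_cons, ih (s + 1)]

theorem gpwSpacesShift (l : List Char) (s : Int) :
    ((PySem.List.enumerate l (s + 1)).filter (fun p => p.2 == ' ')).map (fun p => p.1 + 1)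
      = (((PySem.List.enumerate l s).filter (fun p => p.2 == ' ')).map (fun p => p.1 + 1)).map (· + 1) := by
  rw [gpwEnumShift l s, List.filter_map, List.map_map, List.map_map]
  rfl

theorem gpwSplit_cons_self (s : Char) (l : List Char) :
    gpwSplit s (s :: l) = [] :: gpwSplit s l := by simp [gpwSplit]

theorem gpwSplit_cons_ne (s c : Char) (l : List Char) (h : ¬ c = s) :
    gpwSplit s (c :: l) = (gpwSplit s l).modifyHead (c :: ·) := by simp [gpwSplit, h]

theorem gpwStarts_spaces (l : List Char) :
    (0 : Int) :: ((PySem.List.enumerate l).filter (fun p => p.2 == ' ')).map (fun p => p.1 + 1)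
      = gpwStarts 0 (gpwSplit ' ' l) := by
  induction l with
  | nil => simp [PySem.List.enumerate_nil, gpwSplit, gpwStarts]
  | cons c l ih =>
    by_cases hc : c = ' '
    · subst hc
      rw [PySem.List.enumerate_cons, gpwSplit_cons_self]
      rw [List.filter_cons, if_pos (show (((0 : Int), ' ').2 == ' ') = true from by decide)]
      rw [List.map_cons, gpwSpacesShift l 0, gpwStarts]
      have h1 : gpwStarts ((0 : Int) + ↑(List.length ([] : List Char)) + 1) (gpwSplit ' ' l)
          = (gpwStarts 0 (gpwSplit ' ' l)).map (· + 1) := by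
        rw [show ((0 : Int) + ↑(List.length ([] : List Char)) + 1) = 0 + 1 from by norm_num]
        exact gpwStarts_shift 1 (gpwSplit ' ' l) 0
      rw [h1, ← ih, List.map_cons]
    · rw [PySem.List.enumerate_cons, gpwSplit_cons_ne ' ' c l hc]
      rw [List.filter_cons,
        if_neg (show ¬ (((0 : Int), c).2 == ' ') = true from by simp [hc])]
      rw [gpwSpacesShift l 0]
      cases hsp : gpwSplit ' ' l with
      | nil => exact absurd hsp (gpwSplit_ne_nil ' ' l)
      | cons w r =>
        rw [hsp, gpwStarts] at ih
        have htail := (List.cons.injEq _ _ _ _).mp ih |>.2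
        rw [List.modifyHead, gpwStarts, htail, ← gpwStarts_shift,
          show ((0 : Int) + ↑w.length + 1 + 1) = 0 + ↑(List.length (c :: w)) + 1 from by
            push_cast [List.length_cons]; ring]

theorem gpw_main (cpath tag_p : String) (l : List Char) :
    gpwLoopA cpath tag_p (PySem.Chars.splitOn l [' ']) 0 =
      ((PySem.Chars.splitOn l [' ']).zip
        ((0 : Int) :: ((PySem.List.enumerate l).filter (fun p => p.2 == ' ')).map (fun p => p.1 + 1))).map
        (fun p => gpwDictB cpath tag_p p.1 p.2) := by
  rw [gpwLoopA_eq_zip, gpw_splitOn_eq, gpwStarts_spaces]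

-- ===== VERDICT (by name: the statement is the Claim_ definition above) =====
theorem get_part_words_spec : Claim_equal_get_part_words := by
  intro stcp _
  unfold Spec_get_part_words get_part_words get_part_words_alt
  simp only [PySem.Chars.strip]
  exact gpw_main _ _ _
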